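-- pv_equiv track=rewrite | github.com/Rensing1/gustav | backend/web/routes/learning.py | _parse_include
-- ===== SOURCE A (Python) =====
-- def _parse_include(value: str | None) -> tuple[bool, bool]:
--     if not value:
--         return False, False
--     tokens = [token.strip() for token in value.split(",") if token.strip()]
--     allowed = {"materials", "tasks"}
--     if any(token not in allowed for token in tokens):
--         raise ValueError("invalid_include")
--     return "materials" in tokens, "tasks" in tokens
-- ===== SOURCE B (Python) =====
-- def _parse_include(value):
--     if not value:
--         return False, False
--     materials = tasks = False
--     buf = []
--     for ch in value + ",":
--         if ch == ",":
--             while buf and buf[-1].isspace():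
--                 buf.pop()
--             token = "".join(buf)
--             if token == "materials":
--                 materials = True
--             elif token == "tasks":
--                 tasks = True
--             elif token:
--                 raise ValueError("invalid_include")
--             buf = []
--         elif buf or not ch.isspace():
--             buf.append(ch)
--     return materials, tasks
-- ===== Notes on version B (the rewrite author's own statement) =====
-- stated objective: alternative
-- what changed: B replaces A's split/strip/filter token pipeline plus an any() validation scan and two membership scans with a single character-level scanner over value+',' that builds each token in a buffer (skipping leading whitespace, popping trailing whitespace at each comma) and sets two boolean flags, raising on the first invalid token.
import Mathlib
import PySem

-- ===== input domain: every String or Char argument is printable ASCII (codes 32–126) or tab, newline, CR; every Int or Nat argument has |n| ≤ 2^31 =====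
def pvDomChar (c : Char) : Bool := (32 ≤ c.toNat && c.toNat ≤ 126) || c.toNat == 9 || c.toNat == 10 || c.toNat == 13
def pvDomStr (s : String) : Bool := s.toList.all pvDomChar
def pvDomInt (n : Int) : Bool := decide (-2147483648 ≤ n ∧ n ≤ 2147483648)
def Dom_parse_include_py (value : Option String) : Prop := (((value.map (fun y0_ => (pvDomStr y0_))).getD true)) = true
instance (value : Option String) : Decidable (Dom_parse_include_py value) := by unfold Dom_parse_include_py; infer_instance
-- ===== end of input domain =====

-- B replaces A's split/strip token pipeline (any() validation scan + two membership scans) with a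
-- single character-level scanner maintaining a token buffer and two boolean flags (alternative, same cost).

-- ===== PORT A =====
def parse_include_py (value : Option String) : Bool × Bool :=
  match value with
  | none => (false, false)
  | some v =>
    if v = "" then (false, false)
    else
      let tokens := ((((PySem.Str.split? v ",").getD []).map PySem.Str.strip).filter (fun t => !(t == "")))
      if tokens.any (fun t => !(t == "materials") && !(t == "tasks")) then
        (false, false)  -- raise ValueError("invalid_include"): excluded by Pre_
      else
        (decide ("materials" ∈ tokens), decide ("tasks" ∈ tokens))

-- ===== PORT B =====
-- the `while buf and buf[-1].isspace(): buf.pop()` loop: drop trailing whitespace of the buffer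
def pvPopWs (buf : List Char) : List Char :=
  (buf.reverse.dropWhile PySem.Chars.isspace).reverse

-- the `for ch in value + ","` loop: state = (buffer, materials, tasks)
def pvScanB : List Char → List Char → Bool → Bool → Bool × Bool
  | [], _buf, m, t => (m, t)
  | ch :: rest, buf, m, t =>
    if ch = ',' then
      let token := pvPopWs buf
      if token = "materials".toList then pvScanB rest [] true t
      else if token = "tasks".toList then pvScanB rest [] m true
      else if token ≠ [] then (false, false)  -- raise ValueError("invalid_include"): excluded by Pre_
      else pvScanB rest [] m t
    else if !buf.isEmpty || !PySem.Chars.isspace ch then pvScanB rest (buf ++ [ch]) m t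
    else pvScanB rest buf m t

def parse_include_py_alt (value : Option String) : Bool × Bool :=
  match value with
  | none => (false, false)
  | some v =>
    if v = "" then (false, false)
    else pvScanB (v.toList ++ [',']) [] false false

-- ===== PRECONDITION & SPEC =====
-- Pre_ excludes exactly the inputs on which A raises ValueError("invalid_include"):
-- some comma-separated token, with surrounding whitespace removed (pvToken),
-- is nonempty and neither of the two allowed words.
def pvToken (c : String) : List Char :=
  ((c.toList.dropWhile PySem.Chars.isspace).reverse.dropWhile PySem.Chars.isspace).reverse

def Pre_parse_include_py (value : Option String) : Prop :=
  ∀ c ∈ ((PySem.Str.split? (value.getD "") ",").getD []),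
    pvToken c = [] ∨ pvToken c = "materials".toList ∨ pvToken c = "tasks".toList
instance (value : Option String) : Decidable (Pre_parse_include_py value) := by
  unfold Pre_parse_include_py; infer_instance

def pvWitness_parse_include_py : Option String := some " materials , tasks ,"

def Spec_parse_include_py (value : Option String) (out : Bool × Bool) : Prop := out = parse_include_py_alt value
instance (value : Option String) (out : Bool × Bool) : Decidable (Spec_parse_include_py value out) := by unfold Spec_parse_include_py; infer_instance

-- ===== CLAIM (what is proved, stated in full; the proofs are below) =====
def Claim_equal_parse_include_py : Prop := ∀ (value : Option String), Dom_parse_include_py value → Pre_parse_include_py value → Spec_parse_include_py value (parse_include_py value)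

-- ===== LEMMAS AND PROOFS =====

-- proof-side simple structural split on ',' (shown equal to PySem.Chars.splitOn below)
def pvSplit : List Char → List (List Char)
  | [] => [[]]
  | c :: rest => if c = ',' then [] :: pvSplit rest else (pvSplit rest).modifyHead (c :: ·)

lemma pvSplit_ne_nil (cs : List Char) : pvSplit cs ≠ [] := by
  induction cs with
  | nil => simp [pvSplit]
  | cons c rest ih =>
    simp only [pvSplit]
    split_ifs
    · simp
    · cases h : pvSplit rest with
      | nil => exact absurd h ih
      | cons a b => simp [List.modifyHead]

lemma modifyHead_id' (l : List (List Char)) : l.modifyHead (fun x => x) = l := by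
  cases l <;> simp

lemma splitOn_go_eq (l : List Char) : ∀ (fuel : Nat) (cur : List Char) (acc : List (List Char)),
    l.length < fuel →
    PySem.Chars.splitOn.go [','] fuel l cur acc =
      acc.reverse ++ (pvSplit l).modifyHead (cur.reverse ++ ·) := by
  induction l with
  | nil =>
    intro fuel cur acc hf
    cases fuel with
    | zero => omega
    | succ f => simp [PySem.Chars.splitOn.go, pvSplit]
  | cons c rest ih =>
    intro fuel cur acc hf
    cases fuel with
    | zero => omega
    | succ f =>
      have hr : rest.length < f := by simpa using hf
      by_cases hc : c = ','
      · subst hc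
        have hpf : List.isPrefixOf [','] (',' :: rest) = true := by simp [List.isPrefixOf]
        rw [show PySem.Chars.splitOn.go [','] (f+1) (',' :: rest) cur acc
              = PySem.Chars.splitOn.go [','] f (List.drop 1 (',' :: rest)) [] (cur.reverse :: acc) by
            simp [PySem.Chars.splitOn.go, hpf]]
        simp only [List.drop_one, List.tail_cons]
        rw [ih f [] (cur.reverse :: acc) hr]
        simp [pvSplit, modifyHead_id']
      · have hpf : List.isPrefixOf [','] (c :: rest) = false := by
          simp [List.isPrefixOf]; exact fun h => hc h.symm
        rw [show PySem.Chars.splitOn.go [','] (f+1) (c :: rest) cur acc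
              = PySem.Chars.splitOn.go [','] f rest (c :: cur) acc by
            simp [PySem.Chars.splitOn.go, hpf]]
        rw [ih f (c :: cur) acc hr]
        obtain ⟨h0, tl, hh⟩ : ∃ h0 tl, pvSplit rest = h0 :: tl := by
          cases h : pvSplit rest with
          | nil => exact absurd h (pvSplit_ne_nil rest)
          | cons a b => exact ⟨a, b, rfl⟩
        simp [pvSplit, hc, hh, List.modifyHead]

lemma splitOn_eq (cs : List Char) : PySem.Chars.splitOn cs [','] = pvSplit cs := by
  have := splitOn_go_eq cs (cs.length + 1) [] [] (by omega)
  simpa [PySem.Chars.splitOn, modifyHead_id'] using this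

-- chunk-level reformulation of the scanner
def pvGo : List (List Char) → List Char → Bool → Bool → Bool × Bool
  | [], _b, m, t => (m, t)
  | c :: rest, b, m, t =>
    let token := pvPopWs (b ++ (if b.isEmpty then c.dropWhile PySem.Chars.isspace else c))
    if token = "materials".toList then pvGo rest [] true t
    else if token = "tasks".toList then pvGo rest [] m true
    else if token ≠ [] then (false, false)
    else pvGo rest [] m t

lemma pad_eq (b : List Char) : (b ++ (if b.isEmpty then ([] : List Char).dropWhile PySem.Chars.isspace else [])) = b := by
  cases b <;> simp

lemma scan_eq_go (cs : List Char) : ∀ (buf : List Char) (m t : Bool),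
    pvScanB (cs ++ [',']) buf m t = pvGo (pvSplit cs) buf m t := by
  induction cs with
  | nil =>
    intro buf m t
    show pvScanB [','] buf m t = pvGo [[]] buf m t
    simp only [pvScanB, pvGo, pad_eq]
    simp
  | cons ch rest ih =>
    intro buf m t
    by_cases hc : ch = ','
    · subst hc
      show pvScanB (',' :: (rest ++ [','])) buf m t = pvGo ([] :: pvSplit rest) buf m t
      simp only [pvScanB, pvGo, pad_eq, ih]
      simp
    · obtain ⟨h0, tl, hh⟩ : ∃ h0 tl, pvSplit rest = h0 :: tl := by
        cases h : pvSplit rest with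
        | nil => exact absurd h (pvSplit_ne_nil rest)
        | cons a b => exact ⟨a, b, rfl⟩
      have hsp : pvSplit (ch :: rest) = (ch :: h0) :: tl := by
        simp [pvSplit, hc, hh, List.modifyHead]
      rw [hsp]
      by_cases hb : buf = []
      · subst hb
        by_cases hs : PySem.Chars.isspace ch = true
        · show pvScanB (ch :: (rest ++ [','])) [] m t = _
          rw [show pvScanB (ch :: (rest ++ [','])) [] m t = pvScanB (rest ++ [',']) [] m t by
            simp [pvScanB, hc, hs]]
          rw [ih [] m t, hh]
          simp only [pvGo, List.isEmpty_nil, List.nil_append,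
            List.dropWhile_cons, hs]
          simp
        · show pvScanB (ch :: (rest ++ [','])) [] m t = _
          rw [show pvScanB (ch :: (rest ++ [','])) [] m t = pvScanB (rest ++ [',']) [ch] m t by
            simp [pvScanB, hc, hs]]
          rw [ih [ch] m t, hh]
          simp [pvGo, hs]
      · rw [show pvScanB ((ch :: rest) ++ [',']) buf m t = pvScanB (rest ++ [',']) (buf ++ [ch]) m t by
          simp [pvScanB, hc, hb]]
        rw [ih (buf ++ [ch]) m t, hh]
        simp only [pvGo, List.isEmpty_eq_false_iff .. |>.mpr hb,
          List.isEmpty_eq_false_iff .. |>.mpr (by simp : buf ++ [ch] ≠ [])]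
        simp [List.append_assoc]

lemma pvPopWs_lstrip (c : List Char) :
    pvPopWs (c.dropWhile PySem.Chars.isspace) = PySem.Chars.strip c := by
  simp [pvPopWs, PySem.Chars.strip, PySem.Chars.lstrip, PySem.Chars.rstrip]

lemma go_spec (chunks : List (List Char)) : ∀ (m t : Bool),
    (∀ c ∈ chunks, PySem.Chars.strip c = [] ∨ PySem.Chars.strip c = "materials".toList ∨ PySem.Chars.strip c = "tasks".toList) →
    pvGo chunks [] m t =
      ((m || decide ("materials".toList ∈ chunks.map PySem.Chars.strip)),
       (t || decide ("tasks".toList ∈ chunks.map PySem.Chars.strip))) := by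
  induction chunks with
  | nil => intro m t _; simp [pvGo]
  | cons c rest ih =>
    intro m t h
    have hc := h c (by simp)
    have hrest : ∀ x ∈ rest, PySem.Chars.strip x = [] ∨ PySem.Chars.strip x = "materials".toList ∨ PySem.Chars.strip x = "tasks".toList := by
      intro x hx; exact h x (by simp [hx])
    have htok : pvPopWs (List.dropWhile PySem.Chars.isspace c) = PySem.Chars.strip c := pvPopWs_lstrip c
    rcases hc with h0 | h0 | h0 <;>
      simp [pvGo, htok, h0, ih _ _ hrest]

-- ===== VERDICT (by name: the statement is the Claim_ definition above) =====
theorem parse_include_py_spec : Claim_equal_parse_include_py := by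
  intro value _ hpre
  unfold Pre_parse_include_py at hpre
  unfold Spec_parse_include_py
  cases value with
  | none => rfl
  | some v =>
    simp only [Option.getD_some] at hpre
    by_cases hv : v = ""
    · simp [parse_include_py, parse_include_py_alt, hv]
    · have hsplit : PySem.Str.split? v "," = some ((pvSplit v.toList).map String.ofList) := by
        simp [PySem.Str.split?, PySem.Chars.split?, splitOn_eq]
      have hpre' : ∀ c ∈ pvSplit v.toList,
          PySem.Chars.strip c = [] ∨ PySem.Chars.strip c = "materials".toList ∨ PySem.Chars.strip c = "tasks".toList := by
        intro c hcm
        have h := hpre (String.ofList c) (by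
          rw [hsplit]; simpa using ⟨c, hcm, rfl⟩)
        simpa [pvToken, String.toList_ofList, PySem.Chars.strip, PySem.Chars.lstrip, PySem.Chars.rstrip] using h
      have hstripStr : ∀ c : List Char, PySem.Str.strip (String.ofList c) = String.ofList (PySem.Chars.strip c) := by
        intro c
        rw [← String.ofList_toList (s := PySem.Str.strip (String.ofList c))]
        simp [PySem.Str.toList_strip]
      have hmemStr : ∀ (w : String), w ≠ "" →
          (w ∈ (((((pvSplit v.toList).map String.ofList).map PySem.Str.strip).filter (fun t => !(t == ""))))
            ↔ w.toList ∈ (pvSplit v.toList).map PySem.Chars.strip) := by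
        intro w hw
        rw [List.mem_filter]
        constructor
        · rintro ⟨hm, _⟩
          simp only [List.map_map, List.mem_map, Function.comp] at hm
          obtain ⟨c, hcm, hce⟩ := hm
          rw [hstripStr] at hce
          refine List.mem_map.mpr ⟨c, hcm, ?_⟩
          rw [← hce]; simp
        · intro hm
          obtain ⟨c, hcm, hce⟩ := List.mem_map.mp hm
          constructor
          · simp only [List.map_map, List.mem_map, Function.comp]
            refine ⟨c, hcm, ?_⟩
            rw [hstripStr, hce, String.ofList_toList]
          · simpa using hw
      have hany : (((((pvSplit v.toList).map String.ofList).map PySem.Str.strip).filter (fun t => !(t == ""))).any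
          (fun t => !(t == "materials") && !(t == "tasks"))) = false := by
        simp only [List.any_eq_false]
        intro s hs
        have hmem := List.mem_of_mem_filter hs
        have hne := List.of_mem_filter hs
        simp only [List.map_map, List.mem_map, Function.comp] at hmem
        obtain ⟨c, hcm, hce⟩ := hmem
        rcases hpre' c hcm with h0 | h0 | h0
        · rw [hstripStr, h0] at hce
          rw [show String.ofList ([] : List Char) = "" from rfl] at hce
          subst hce
          simp at hne
        · rw [hstripStr, h0, String.ofList_toList] at hce
          subst hce
          decide
        · rw [hstripStr, h0, String.ofList_toList] at hce
          subst hce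
          decide
      have hB : parse_include_py_alt (some v) = pvGo (pvSplit v.toList) [] false false := by
        simp [parse_include_py_alt, hv, scan_eq_go]
      rw [hB, go_spec _ _ _ hpre']
      simp only [parse_include_py, if_neg hv, hsplit, Option.getD_some, hany,
        Bool.false_eq_true, if_false, Bool.false_or]
      refine Prod.ext ?_ ?_
      · exact decide_eq_decide.mpr (hmemStr "materials" (by decide))
      · exact decide_eq_decide.mpr (hmemStr "tasks" (by decide))
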